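-- pv_equiv track=rewrite | github.com/keoulaur/mth210-fall26 | ldk_convert.py | _parse_col_spec
-- ===== SOURCE A (Python) =====
-- def _parse_col_spec(spec):
--     cols = []
--     i = 0
--     while i < len(spec):
--         ch = spec[i]
--         if ch in 'lcr':
--             cols.append([{'l': 'left', 'c': 'center', 'r': 'right'}[ch], False])
--             i += 1
--         elif ch == '|':
--             while i < len(spec) and spec[i] == '|':
--                 i += 1
--             if cols:
--                 cols[-1][1] = True
--         elif ch == 'p':
--             i += 1
--             if i < len(spec) and spec[i] == '{':
--                 depth, i = 1, i + 1
--                 while i < len(spec) and depth > 0: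
--                     if spec[i] == '{': depth += 1
--                     elif spec[i] == '}': depth -= 1
--                     i += 1
--             cols.append(['left', False])
--         else:
--             i += 1
--     return [(align, has_right) for align, has_right in cols]
-- ===== SOURCE B (Python) =====
-- def _parse_col_spec(spec):
--     # Pass 1: lex the spec into a flat token list ('left'/'center'/'right' column
--     # tokens and '|' border tokens); pass 2: fold the tokens into columns.
--     ALIGN = {'l': 'left', 'c': 'center', 'r': 'right'}
--     toks = []
--     i, n = 0, len(spec)
--     while i < n:
--         c = spec[i]
--         i += 1
--         if c in ALIGN:
--             toks.append(ALIGN[c])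
--         elif c == '|':
--             toks.append('|')
--         elif c == 'p':
--             if i < n and spec[i] == '{':
--                 depth, i = 1, i + 1
--                 while i < n and depth:
--                     depth += {'{': 1, '}': -1}.get(spec[i], 0)
--                     i += 1
--             toks.append('left')
--     cols = []
--     for t in toks:
--         if t == '|':
--             if cols:
--                 cols[-1] = (cols[-1][0], True)
--         else:
--             cols.append((t, False))
--     return cols
-- ===== Notes on version B (the rewrite author's own statement) =====
-- stated objective: alternative
-- what changed: Replaces A's single index-driven while loop with nested bar-collapsing/last-mutation logic by a two-pass design: a lexer that flattens the spec into a token list (one '|' token per bar, no inner bar loop) followed by a fold that builds the column tuples, relying on the idempotence of setting the last column's border flag.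
import Mathlib
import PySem

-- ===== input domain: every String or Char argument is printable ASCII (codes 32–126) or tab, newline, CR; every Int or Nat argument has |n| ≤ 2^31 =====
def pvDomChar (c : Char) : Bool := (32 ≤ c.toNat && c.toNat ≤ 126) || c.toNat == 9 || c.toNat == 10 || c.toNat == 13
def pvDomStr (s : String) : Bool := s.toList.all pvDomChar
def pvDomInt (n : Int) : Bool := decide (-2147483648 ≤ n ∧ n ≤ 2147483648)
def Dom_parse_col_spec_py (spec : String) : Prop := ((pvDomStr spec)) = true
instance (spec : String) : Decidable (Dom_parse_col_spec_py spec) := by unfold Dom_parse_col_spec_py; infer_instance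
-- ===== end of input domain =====

-- B re-implements A as a lexer pass plus a token fold (alternative decomposition; same cost).

-- ===== PORT A =====
-- inner `while … spec[i] == '|'` loop of A
def pvSkipBarsA : List Char → List Char
  | '|' :: rest => pvSkipBarsA rest
  | l => l

-- inner brace-depth loop of A (`while i < len(spec) and depth > 0`)
def pvSkipBraceA : Nat → List Char → List Char
  | 0, l => l
  | _ + 1, [] => []
  | d + 1, c :: rest =>
      if c = '{' then pvSkipBraceA (d + 2) rest
      else if c = '}' then pvSkipBraceA d rest
      else pvSkipBraceA (d + 1) rest

-- `if cols: cols[-1][1] = True`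
def pvSetLastA : List (String × Bool) → List (String × Bool)
  | [] => []
  | [(a, _)] => [(a, true)]
  | x :: xs => x :: pvSetLastA xs

theorem pvSkipBarsA_len_le (l : List Char) : (pvSkipBarsA l).length ≤ l.length := by
  induction l with
  | nil => simp [pvSkipBarsA]
  | cons c r ih =>
      by_cases h : c = '|'
      · subst h; simpa [pvSkipBarsA] using Nat.le_succ_of_le ih
      · cases c <;> simp_all [pvSkipBarsA]

theorem pvSkipBraceA_len_le (d : Nat) (l : List Char) : (pvSkipBraceA d l).length ≤ l.length := by
  induction l generalizing d with
  | nil => cases d <;> simp [pvSkipBraceA]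
  | cons c r ih =>
      cases d with
      | zero => simp [pvSkipBraceA]
      | succ d =>
          simp only [pvSkipBraceA]
          split_ifs <;> exact Nat.le_succ_of_le (ih _)

-- A's main `while i < len(spec)` loop, state = (remaining chars, cols);
-- `if i < len(spec) and spec[i] == '{'` is the head? test below
def pvLoopA : List Char → List (String × Bool) → List (String × Bool)
  | [], cols => cols
  | ch :: rest, cols =>
      if ch = 'l' then pvLoopA rest (cols ++ [("left", false)])
      else if ch = 'c' then pvLoopA rest (cols ++ [("center", false)])
      else if ch = 'r' then pvLoopA rest (cols ++ [("right", false)])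
      else if ch = '|' then pvLoopA (pvSkipBarsA rest) (pvSetLastA cols)
      else if ch = 'p' then
        if rest.head? = some '{' then pvLoopA (pvSkipBraceA 1 rest.tail) (cols ++ [("left", false)])
        else pvLoopA rest (cols ++ [("left", false)])
      else pvLoopA rest cols
  termination_by l _ => l.length
  decreasing_by
    all_goals simp_all
    · exact pvSkipBarsA_len_le _
    · exact le_trans (pvSkipBraceA_len_le _ _) (by simpa using List.length_tail_le rest)

def parse_col_spec_py (spec : String) : List (String × Bool) :=
  -- final comprehension `[(align, has_right) for …]` is the identity on pairs here
  pvLoopA spec.toList []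

-- ===== PORT B =====
-- B's inner brace loop: `depth += {'{':1,'}':-1}.get(spec[i],0)` while `depth` truthy
def pvSkipBraceB : Int → List Char → List Char
  | d, l =>
      if d = 0 then l
      else match l with
        | [] => []
        | c :: rest => pvSkipBraceB (d + (if c = '{' then 1 else if c = '}' then -1 else 0)) rest
  termination_by _ l => l.length

theorem pvSkipBraceB_len_le (d : Int) (l : List Char) : (pvSkipBraceB d l).length ≤ l.length := by
  induction l generalizing d with
  | nil => rw [pvSkipBraceB]; split <;> simp
  | cons c r ih =>
      rw [pvSkipBraceB]
      split
      · simp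
      · exact Nat.le_succ_of_le (ih _)

-- B's lexer pass: one token per column / per bar
def pvLexB : List Char → List String
  | [] => []
  | c :: rest =>
      if c = 'l' then "left" :: pvLexB rest
      else if c = 'c' then "center" :: pvLexB rest
      else if c = 'r' then "right" :: pvLexB rest
      else if c = '|' then "|" :: pvLexB rest
      else if c = 'p' then
        if rest.head? = some '{' then "left" :: pvLexB (pvSkipBraceB 1 rest.tail)
        else "left" :: pvLexB rest
      else pvLexB rest
  termination_by l => l.length
  decreasing_by
    all_goals simp_all
    exact le_trans (pvSkipBraceB_len_le _ _) (by simpa using List.length_tail_le rest)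

-- B's builder step (body of the `for t in toks` loop)
def pvStepB (cols : List (String × Bool)) (t : String) : List (String × Bool) :=
  if t = "|" then
    if cols = [] then cols
    else cols.dropLast ++ [((cols.getLastD ("", false)).1, true)]
  else cols ++ [(t, false)]

def parse_col_spec_py_alt (spec : String) : List (String × Bool) :=
  (pvLexB spec.toList).foldl pvStepB []

-- ===== PRECONDITION & SPEC =====
def Spec_parse_col_spec_py (spec : String) (out : List (String × Bool)) : Prop := out = parse_col_spec_py_alt spec
instance (spec : String) (out : List (String × Bool)) : Decidable (Spec_parse_col_spec_py spec out) := by unfold Spec_parse_col_spec_py; infer_instance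

-- ===== CLAIM (what is proved, stated in full; the proofs are below) =====
def Claim_equal_parse_col_spec_py : Prop := ∀ (spec : String), Dom_parse_col_spec_py spec → Spec_parse_col_spec_py spec (parse_col_spec_py spec)

-- ===== LEMMAS AND PROOFS =====

-- unfolding equations for the two well-founded loops
theorem pvLoopA_nil (cols : List (String × Bool)) : pvLoopA [] cols = cols := by
  rw [pvLoopA.eq_def]

theorem pvLoopA_cons (c : Char) (r : List Char) (cols : List (String × Bool)) :
    pvLoopA (c :: r) cols =
      if c = 'l' then pvLoopA r (cols ++ [("left", false)])
      else if c = 'c' then pvLoopA r (cols ++ [("center", false)])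
      else if c = 'r' then pvLoopA r (cols ++ [("right", false)])
      else if c = '|' then pvLoopA (pvSkipBarsA r) (pvSetLastA cols)
      else if c = 'p' then
        if r.head? = some '{' then pvLoopA (pvSkipBraceA 1 r.tail) (cols ++ [("left", false)])
        else pvLoopA r (cols ++ [("left", false)])
      else pvLoopA r cols := by
  rw [pvLoopA.eq_def]

theorem pvLexB_nil : pvLexB [] = [] := by
  rw [pvLexB.eq_def]

theorem pvLexB_cons (c : Char) (r : List Char) :
    pvLexB (c :: r) =
      (if c = 'l' then "left" :: pvLexB r
      else if c = 'c' then "center" :: pvLexB r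
      else if c = 'r' then "right" :: pvLexB r
      else if c = '|' then "|" :: pvLexB r
      else if c = 'p' then
        if r.head? = some '{' then "left" :: pvLexB (pvSkipBraceB 1 r.tail)
        else "left" :: pvLexB r
      else pvLexB r) := by
  rw [pvLexB.eq_def]

-- B's column step appends a fresh column
theorem pvStepB_col (cols : List (String × Bool)) (t : String) (h : t ≠ "|") :
    pvStepB cols t = cols ++ [(t, false)] := by
  simp [pvStepB, h]

-- B's bar step is A's "set last column's border" operation
theorem pvStepB_bar (cols : List (String × Bool)) : pvStepB cols "|" = pvSetLastA cols := by
  induction cols with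
  | nil => simp [pvStepB, pvSetLastA]
  | cons x xs ih =>
      cases xs with
      | nil => simp [pvStepB, pvSetLastA]
      | cons y ys =>
          simp only [pvStepB, if_pos rfl] at ih ⊢
          simp_all [pvSetLastA]

theorem pvSetLastA_ne_nil (x : String × Bool) (xs : List (String × Bool)) : pvSetLastA (x :: xs) ≠ [] := by
  cases xs with
  | nil => obtain ⟨a, b⟩ := x; simp [pvSetLastA]
  | cons y ys => simp [pvSetLastA]

theorem pvSetLastA_idem (cols : List (String × Bool)) : pvSetLastA (pvSetLastA cols) = pvSetLastA cols := by
  induction cols with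
  | nil => rfl
  | cons x xs ih =>
      cases xs with
      | nil => obtain ⟨a, b⟩ := x; simp [pvSetLastA]
      | cons y ys =>
          rw [show pvSetLastA (x :: y :: ys) = x :: pvSetLastA (y :: ys) from rfl]
          cases hzz : pvSetLastA (y :: ys) with
          | nil => exact absurd hzz (pvSetLastA_ne_nil y ys)
          | cons z zs =>
              rw [show pvSetLastA (x :: z :: zs) = x :: pvSetLastA (z :: zs) from rfl, ← hzz, ih]

-- B's brace scanner equals A's at every nonnegative depth
theorem pvSkipBrace_eq (l : List Char) (d : Nat) : pvSkipBraceB (d : Int) l = pvSkipBraceA d l := by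
  induction l generalizing d with
  | nil => cases d <;> simp [pvSkipBraceB, pvSkipBraceA]
  | cons c r ih =>
      cases d with
      | zero => simp [pvSkipBraceB, pvSkipBraceA]
      | succ d =>
          rw [pvSkipBraceB]
          have hd : ((d : Int) + 1) ≠ 0 := by omega
          simp only [Nat.cast_add, Nat.cast_one, if_neg hd, pvSkipBraceA]
          split_ifs with h1 h2
          · rw [show ((d : Int) + 1 + 1) = ((d + 2 : Nat) : Int) by push_cast; ring]
            exact ih (d + 2)
          · rw [show ((d : Int) + 1 + -1) = ((d : Nat) : Int) by push_cast; ring]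
            exact ih d
          · rw [show ((d : Int) + 1 + 0) = ((d + 1 : Nat) : Int) by push_cast; ring]
            exact ih (d + 1)

-- after a set-last, a run of leading bars contributes nothing further
theorem pvFold_bars (rest : List Char) (cols : List (String × Bool)) :
    (pvLexB rest).foldl pvStepB (pvSetLastA cols) =
      (pvLexB (pvSkipBarsA rest)).foldl pvStepB (pvSetLastA cols) := by
  induction rest generalizing cols with
  | nil => rfl
  | cons c r ih =>
      by_cases h : c = '|'
      · subst h
        rw [pvLexB_cons, if_neg (by decide : ¬ ('|' : Char) = 'l'),
          if_neg (by decide : ¬ ('|' : Char) = 'c'), if_neg (by decide : ¬ ('|' : Char) = 'r'),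
          if_pos (rfl : ('|' : Char) = '|'), List.foldl_cons, pvStepB_bar, pvSetLastA_idem,
          show pvSkipBarsA ('|' :: r) = pvSkipBarsA r from rfl]
        exact ih cols
      · have : pvSkipBarsA (c :: r) = c :: r := by cases c <;> simp_all [pvSkipBarsA]
        rw [this]

-- main loop invariant: A's loop = B's fold over the lexed tokens
theorem pvLoop_eq (l : List Char) (cols : List (String × Bool)) :
    pvLoopA l cols = (pvLexB l).foldl pvStepB cols := by
  induction hn : l.length using Nat.strong_induction_on generalizing l cols with
  | _ n ih =>
      cases l with
      | nil => simp [pvLoopA_nil, pvLexB_nil]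
      | cons c r =>
          subst hn
          rw [pvLoopA_cons, pvLexB_cons]
          by_cases h1 : c = 'l'
          · simp only [if_pos h1, List.foldl_cons, pvStepB_col cols "left" (by decide)]
            exact ih r.length (by simp) r _ rfl
          by_cases h2 : c = 'c'
          · simp only [if_neg h1, if_pos h2, List.foldl_cons, pvStepB_col cols "center" (by decide)]
            exact ih r.length (by simp) r _ rfl
          by_cases h3 : c = 'r'
          · simp only [if_neg h1, if_neg h2, if_pos h3, List.foldl_cons,
              pvStepB_col cols "right" (by decide)]
            exact ih r.length (by simp) r _ rfl
          by_cases h4 : c = '|'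
          · simp only [if_neg h1, if_neg h2, if_neg h3, if_pos h4, List.foldl_cons, pvStepB_bar]
            rw [pvFold_bars]
            exact ih (pvSkipBarsA r).length (Nat.lt_succ_of_le (pvSkipBarsA_len_le r)) _ _ rfl
          by_cases h5 : c = 'p'
          · simp only [if_neg h1, if_neg h2, if_neg h3, if_neg h4, if_pos h5]
            by_cases h6 : r.head? = some '{'
            · have hbr : pvSkipBraceB 1 r.tail = pvSkipBraceA 1 r.tail := by
                simpa using pvSkipBrace_eq r.tail 1
              simp only [if_pos h6, List.foldl_cons, pvStepB_col cols "left" (by decide), hbr]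
              exact ih (pvSkipBraceA 1 r.tail).length
                (Nat.lt_succ_of_le (le_trans (pvSkipBraceA_len_le 1 r.tail)
                  (by simpa using List.length_tail_le r))) _ _ rfl
            · simp only [if_neg h6, List.foldl_cons, pvStepB_col cols "left" (by decide)]
              exact ih r.length (by simp) r _ rfl
          · simp only [if_neg h1, if_neg h2, if_neg h3, if_neg h4, if_neg h5]
            exact ih r.length (by simp) r _ rfl

-- ===== VERDICT (by name: the statement is the Claim_ definition above) =====
theorem parse_col_spec_py_spec : Claim_equal_parse_col_spec_py := by
  intro spec _
  unfold Spec_parse_col_spec_py parse_col_spec_py parse_col_spec_py_alt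
  exact pvLoop_eq spec.toList []
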